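-- pv_equiv track=rewrite | github.com/dcfernandez1023/MoviesDB | parsing_scripts/movies_parser.py | tokenize_movie_entry
-- ===== SOURCE A (Python) =====
-- def tokenize_movie_entry(entry):
--     # need to parse 3 separate fields: id, title+year, genres
--     start_delim = entry.find(":")
--     end_delim = entry.rfind(":")
--     if start_delim == -1 or end_delim == -1:
--         return ["", "", ""]
--     # parse id
--     movie_id = ""
--     i = 0
--     while i < start_delim:
--         if entry[i].isdigit():
--             movie_id += entry[i]
--         i += 1
--     # parse title+year
--     title_year = ""
--     t = start_delim + 1
--     while t < end_delim:
--         title_year += entry[t]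
--         t += 1
--     # parse genres
--     genres = ""
--     g = end_delim + 1
--     while g < len(entry):
--         genres += entry[g]
--         g += 1
--     return [movie_id.strip(), title_year.strip(), genres.strip()]
-- ===== SOURCE B (Python) =====
-- def tokenize_movie_entry(entry):
--     # split on the first and last colon with partition/rpartition instead of index loops
--     head, sep, rest = entry.partition(":")
--     if not sep:
--         return ["", "", ""]
--     title_year, _, genres = rest.rpartition(":")
--     movie_id = "".join(ch for ch in head if ch.isdigit())
--     return [movie_id.strip(), title_year.strip(), genres.strip()]
-- ===== Notes on version B (the rewrite author's own statement) =====
-- stated objective: idiomatic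
-- what changed: B splits the entry with partition/rpartition and a digit filter instead of locating first/last colon indices and running three index-based character-accumulation while loops.
import Mathlib
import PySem

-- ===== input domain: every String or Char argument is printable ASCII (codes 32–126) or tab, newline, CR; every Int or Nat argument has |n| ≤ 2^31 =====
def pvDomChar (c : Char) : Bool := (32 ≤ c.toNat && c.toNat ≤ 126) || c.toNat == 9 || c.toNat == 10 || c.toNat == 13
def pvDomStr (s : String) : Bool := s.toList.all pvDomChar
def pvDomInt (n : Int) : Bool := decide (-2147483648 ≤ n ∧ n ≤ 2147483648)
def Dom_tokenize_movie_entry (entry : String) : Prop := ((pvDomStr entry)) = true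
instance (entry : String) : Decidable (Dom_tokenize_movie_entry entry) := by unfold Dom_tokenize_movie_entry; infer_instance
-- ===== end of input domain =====

-- B splits with partition/rpartition and a digit filter instead of A's three index-based while loops; same results, idiomatic decomposition.

-- ===== PORT A =====
def tokenize_movie_entry (entry : String) : List String :=
  let l := entry.toList
  let start_delim := PySem.Chars.find l [':']
  let end_delim := PySem.Chars.rfind l [':']
  if start_delim = -1 ∨ end_delim = -1 then ["", "", ""]
  else
    -- while i < start_delim: if entry[i].isdigit(): movie_id += entry[i]
    let movie_id := (PySem.List.pyRange 0 start_delim 1).foldl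
      (fun acc i => if PySem.Chars.isdigit (PySem.List.pyGetD l i ' ') then acc ++ [PySem.List.pyGetD l i ' '] else acc) []
    -- while t < end_delim: title_year += entry[t]
    let title_year := (PySem.List.pyRange (start_delim + 1) end_delim 1).foldl
      (fun acc t => acc ++ [PySem.List.pyGetD l t ' ']) []
    -- while g < len(entry): genres += entry[g]
    let genres := (PySem.List.pyRange (end_delim + 1) ((l.length : Int)) 1).foldl
      (fun acc g => acc ++ [PySem.List.pyGetD l g ' ']) []
    [String.ofList (PySem.Chars.strip movie_id),
     String.ofList (PySem.Chars.strip title_year),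
     String.ofList (PySem.Chars.strip genres)]

-- ===== PORT B =====
def tokenize_movie_entry_alt (entry : String) : List String :=
  let l := entry.toList
  -- head, sep, rest = entry.partition(":")
  let head := l.takeWhile (fun c => c != ':')
  if l.contains ':' then
    let rest := (l.dropWhile (fun c => c != ':')).tail
    -- title_year, _, genres = rest.rpartition(":")  (via reverse + span)
    let rrev := rest.reverse
    let genres := (rrev.takeWhile (fun c => c != ':')).reverse
    let title_year := ((rrev.dropWhile (fun c => c != ':')).tail).reverse
    let movie_id := head.filter PySem.Chars.isdigit
    [String.ofList (PySem.Chars.strip movie_id),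
     String.ofList (PySem.Chars.strip title_year),
     String.ofList (PySem.Chars.strip genres)]
  else ["", "", ""]

-- ===== PRECONDITION & SPEC =====
def Spec_tokenize_movie_entry (entry : String) (out : List String) : Prop := out = tokenize_movie_entry_alt entry
instance (entry : String) (out : List String) : Decidable (Spec_tokenize_movie_entry entry out) := by unfold Spec_tokenize_movie_entry; infer_instance

-- ===== CLAIM (what is proved, stated in full; the proofs are below) =====
def Claim_equal_tokenize_movie_entry : Prop := ∀ (entry : String), Dom_tokenize_movie_entry entry → Spec_tokenize_movie_entry entry (tokenize_movie_entry entry)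

-- ===== LEMMAS AND PROOFS =====

theorem pv_isPrefixOf_singleton (c : Char) (x : List Char) :
    [c].isPrefixOf x = true ↔ x.head? = some c := by
  cases x with
  | nil => simp [List.isPrefixOf]
  | cons h t =>
    simp only [List.isPrefixOf, List.head?, Option.some.injEq, Bool.and_eq_true, beq_iff_eq,
      List.isPrefixOf_nil_left, and_true]
    exact ⟨Eq.symm, Eq.symm⟩

theorem pv_mem_decomp {c : Char} {l : List Char} (h : c ∈ l) :
    ∃ P R, l = P ++ c :: R ∧ c ∉ P := by
  induction l with
  | nil => cases h
  | cons a t ih =>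
    by_cases hac : a = c
    · exact ⟨[], t, by simp [hac], by simp⟩
    · have ht : c ∈ t := by
        rcases List.mem_cons.mp h with h1 | h2
        · exact absurd h1.symm hac
        · exact h2
      rcases ih ht with ⟨P, R, hPR, hnP⟩
      refine ⟨a :: P, R, by simp [hPR], ?_⟩
      intro hm
      rcases List.mem_cons.mp hm with h1 | h2
      · exact hac h1.symm
      · exact hnP h2

theorem pv_takeWhile_append {c : Char} {P R : List Char} (h : c ∉ P) :
    (P ++ c :: R).takeWhile (fun x => x != c) = P := by
  induction P with
  | nil => simp
  | cons a t ih =>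
    have ha : (a != c) = true := by
      simp only [bne_iff_ne, ne_eq]
      intro e; exact h (by simp [e])
    simp [List.takeWhile, ha, ih (fun hm => h (List.mem_cons_of_mem a hm))]

theorem pv_dropWhile_append {c : Char} {P R : List Char} (h : c ∉ P) :
    (P ++ c :: R).dropWhile (fun x => x != c) = c :: R := by
  induction P with
  | nil => simp
  | cons a t ih =>
    have ha : (a != c) = true := by
      simp only [bne_iff_ne, ne_eq]
      intro e; exact h (by simp [e])
    simp [List.dropWhile, ha, ih (fun hm => h (List.mem_cons_of_mem a hm))]

theorem pv_takeWhile_all {c : Char} {A : List Char} (h : c ∉ A) :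
    A.takeWhile (fun x => x != c) = A := by
  induction A with
  | nil => rfl
  | cons a t ih =>
    have ha : (a != c) = true := by
      simp only [bne_iff_ne, ne_eq]
      intro e; exact h (by simp [e])
    simp [List.takeWhile, ha, ih (fun hm => h (List.mem_cons_of_mem a hm))]

theorem pv_dropWhile_all {c : Char} {A : List Char} (h : c ∉ A) :
    A.dropWhile (fun x => x != c) = [] := by
  induction A with
  | nil => rfl
  | cons a t ih =>
    have ha : (a != c) = true := by
      simp only [bne_iff_ne, ne_eq]
      intro e; exact h (by simp [e])
    simp [List.dropWhile, ha, ih (fun hm => h (List.mem_cons_of_mem a hm))]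

theorem pv_find_go {c : Char} (P R : List Char) (h : c ∉ P) (k : Nat) :
    PySem.Chars.find.go [c] (P ++ c :: R) k = (k : Int) + P.length := by
  induction P generalizing k with
  | nil => simp [PySem.Chars.find.go, List.isPrefixOf]
  | cons a t ih =>
    have ha : (c == a) = false := by
      simp only [beq_eq_false_iff_ne, ne_eq]
      intro e; exact h (by simp [e])
    have hpre : [c].isPrefixOf (a :: (t ++ c :: R)) = false := by
      simp [List.isPrefixOf, ha]
    simp only [List.cons_append, PySem.Chars.find.go, hpre, Bool.false_eq_true, if_false,
      ih (fun hm => h (List.mem_cons_of_mem a hm))]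
    push_cast [List.length_cons]
    ring

theorem pv_find_eq {c : Char} (P R : List Char) (h : c ∉ P) :
    PySem.Chars.find (P ++ c :: R) [c] = (P.length : Int) := by
  have := pv_find_go P R h 0
  simpa [PySem.Chars.find] using this

theorem pv_rfind_go {c : Char} (A B : List Char) (h : c ∉ B) :
    ∀ k : Nat, A.length ≤ k → k ≤ (A ++ c :: B).length →
      PySem.Chars.rfind.go (A ++ c :: B) [c] k = (A.length : Int) := by
  intro k
  induction k with
  | zero =>
    intro h1 _
    have hA : A = [] := List.length_eq_zero_iff.mp (Nat.le_zero.mp h1)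
    subst hA
    simp [PySem.Chars.rfind.go, List.isPrefixOf]
  | succ j ih =>
    intro h1 h2
    by_cases he : A.length = j + 1
    · have hdrop : (A ++ c :: B).drop (j + 1) = c :: B := by
        rw [← he]; simp
      simp [PySem.Chars.rfind.go, hdrop, List.isPrefixOf, ← he]
    · have hlt : A.length ≤ j := by omega
      have hdrop : (A ++ c :: B).drop (j + 1) = B.drop (j - A.length) := by
        rw [List.drop_append]
        have h3 : A.drop (j+1) = [] := List.drop_eq_nil_of_le (by omega)
        have h4 : j + 1 - A.length = (j - A.length) + 1 := by omega
        rw [h3, h4, List.nil_append, List.drop_succ_cons]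
      have hpre : [c].isPrefixOf ((A ++ c :: B).drop (j + 1)) = false := by
        rw [hdrop]
        by_contra hb
        have hb' : [c].isPrefixOf (B.drop (j - A.length)) = true := by
          revert hb; cases ([c].isPrefixOf (B.drop (j - A.length))) <;> simp
        have hh := (pv_isPrefixOf_singleton c _).mp hb'
        rw [List.head?_drop] at hh
        exact h (List.mem_of_getElem? hh)
      simp only [PySem.Chars.rfind.go, hpre, Bool.false_eq_true, if_false]
      exact ih hlt (by omega)

theorem pv_rfind_eq {c : Char} (A B : List Char) (h : c ∉ B) :
    PySem.Chars.rfind (A ++ c :: B) [c] = (A.length : Int) := by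
  unfold PySem.Chars.rfind
  exact pv_rfind_go A B h (A ++ c :: B).length (by simp) le_rfl

theorem pv_movie_loop (P rest : List Char) :
    (PySem.List.pyRange 0 (P.length : Int) 1).foldl
      (fun acc i => if PySem.Chars.isdigit (PySem.List.pyGetD (P ++ rest) i ' ') then acc ++ [PySem.List.pyGetD (P ++ rest) i ' '] else acc) []
    = P.filter PySem.Chars.isdigit := by
  rw [PySem.List.foldl_congr_mem (PySem.List.pyRange 0 (P.length : Int) 1)
    (fun acc i => if PySem.Chars.isdigit (PySem.List.pyGetD (P ++ rest) i ' ') then acc ++ [PySem.List.pyGetD (P ++ rest) i ' '] else acc)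
    (fun acc i => if PySem.Chars.isdigit (PySem.List.pyGetD P i ' ') then acc ++ [PySem.List.pyGetD P i ' '] else acc)
    [] ?_]
  · rw [PySem.List.foldl_pyRange_zero_pyGetD' P ' ' (fun acc x => if PySem.Chars.isdigit x then acc ++ [x] else acc) []]
    exact PySem.List.foldl_append_if_eq_filter PySem.Chars.isdigit P []
  · intro acc i hi
    have hb := (PySem.List.mem_pyRange_one).mp hi
    have hget : PySem.List.pyGetD (P ++ rest) i ' ' = PySem.List.pyGetD P i ' ' := by
      rw [PySem.List.pyGetD_eq_getElem _ ' ' hb.1 (by simp; omega),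
          PySem.List.pyGetD_eq_getElem _ ' ' hb.1 (by exact_mod_cast hb.2)]
      exact List.getElem_append_left (by omega)
    simp only [hget]

theorem pv_copy_loop (M tail : List Char) (a : Nat) :
    (PySem.List.pyRange (a : Int) (M.length : Int) 1).foldl
      (fun acc t => acc ++ [PySem.List.pyGetD (M ++ tail) t ' ']) []
    = M.drop a := by
  rw [PySem.List.foldl_congr_mem (PySem.List.pyRange (a : Int) (M.length : Int) 1)
    (fun acc t => acc ++ [PySem.List.pyGetD (M ++ tail) t ' '])
    (fun acc t => acc ++ [PySem.List.pyGetD M t ' '])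
    [] ?_]
  · rw [PySem.List.foldl_pyRange_pyGetD' M ' ' (fun acc x => acc ++ [x]) [] (a := (a : Int)) (by exact_mod_cast Nat.zero_le a)]
    rw [PySem.List.foldl_append_singleton_eq_self]
    simp
  · intro acc i hi
    have hb := (PySem.List.mem_pyRange_one).mp hi
    have h0 : (0:Int) ≤ i := le_trans (by exact_mod_cast Nat.zero_le a) hb.1
    have hget : PySem.List.pyGetD (M ++ tail) i ' ' = PySem.List.pyGetD M i ' ' := by
      rw [PySem.List.pyGetD_eq_getElem _ ' ' h0 (by simp; omega),
          PySem.List.pyGetD_eq_getElem _ ' ' h0 (by exact_mod_cast hb.2)]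
      exact List.getElem_append_left (by omega)
    simp only [hget]

theorem pv_drop_loop (L : List Char) (a : Nat) :
    (PySem.List.pyRange (a : Int) (L.length : Int) 1).foldl
      (fun acc g => acc ++ [PySem.List.pyGetD L g ' ']) [] = L.drop a := by
  rw [PySem.List.foldl_pyRange_pyGetD' L ' ' (fun acc x => acc ++ [x]) [] (a := (a : Int)) (by exact_mod_cast Nat.zero_le a)]
  rw [PySem.List.foldl_append_singleton_eq_self]
  simp

theorem pv_main (l : List Char) :
    (let start_delim := PySem.Chars.find l [':']
     let end_delim := PySem.Chars.rfind l [':']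
     if start_delim = -1 ∨ end_delim = -1 then (["", "", ""] : List String)
     else
       let movie_id := (PySem.List.pyRange 0 start_delim 1).foldl
         (fun acc i => if PySem.Chars.isdigit (PySem.List.pyGetD l i ' ') then acc ++ [PySem.List.pyGetD l i ' '] else acc) []
       let title_year := (PySem.List.pyRange (start_delim + 1) end_delim 1).foldl
         (fun acc t => acc ++ [PySem.List.pyGetD l t ' ']) []
       let genres := (PySem.List.pyRange (end_delim + 1) ((l.length : Int)) 1).foldl
         (fun acc g => acc ++ [PySem.List.pyGetD l g ' ']) []
       [String.ofList (PySem.Chars.strip movie_id),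
        String.ofList (PySem.Chars.strip title_year),
        String.ofList (PySem.Chars.strip genres)])
    =
    (let head := l.takeWhile (fun c => c != ':')
     if l.contains ':' then
       let rest := (l.dropWhile (fun c => c != ':')).tail
       let rrev := rest.reverse
       let genres := (rrev.takeWhile (fun c => c != ':')).reverse
       let title_year := ((rrev.dropWhile (fun c => c != ':')).tail).reverse
       let movie_id := head.filter PySem.Chars.isdigit
       [String.ofList (PySem.Chars.strip movie_id),
        String.ofList (PySem.Chars.strip title_year),
        String.ofList (PySem.Chars.strip genres)]
     else ["", "", ""]) := by
  by_cases hmem : ':' ∈ l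
  · rcases pv_mem_decomp hmem with ⟨P, R, hPR, hP⟩
    subst hPR
    simp only
    rw [pv_find_eq P R hP]
    rw [pv_takeWhile_append hP, pv_dropWhile_append hP]
    by_cases hR : ':' ∈ R
    · -- a second colon exists: R = T.reverse ++ ':' :: Q.reverse
      rcases pv_mem_decomp ((List.mem_reverse).mpr hR) with ⟨Q, T, hQT, hQ⟩
      have hR2 : R = T.reverse ++ ':' :: Q.reverse := by
        have := congrArg List.reverse hQT
        simpa using this
      subst hR2
      have hassoc : P ++ ':' :: (T.reverse ++ ':' :: Q.reverse)
          = (P ++ ':' :: T.reverse) ++ ':' :: Q.reverse := by simp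
      have hrf : PySem.Chars.rfind (P ++ ':' :: (T.reverse ++ ':' :: Q.reverse)) [':']
          = (((P ++ ':' :: T.reverse).length : Nat) : Int) := by
        rw [hassoc]
        exact pv_rfind_eq _ _ (by simpa using hQ)
      rw [hrf]
      rw [if_neg (by intro hc; rcases hc with hc | hc <;> omega)]
      rw [if_pos (by simp)]
      -- movie id
      rw [pv_movie_loop P (':' :: (T.reverse ++ ':' :: Q.reverse))]
      -- title: copy loop on M = P ++ ':' :: T.reverse
      have hstart : ((P.length : Int) + 1) = (((P.length + 1 : Nat)) : Int) := by push_cast; ring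
      have htitle : (PySem.List.pyRange ((P.length : Int) + 1) (((P ++ ':' :: T.reverse).length : Nat) : Int) 1).foldl
          (fun acc t => acc ++ [PySem.List.pyGetD (P ++ ':' :: (T.reverse ++ ':' :: Q.reverse)) t ' ']) []
          = T.reverse := by
        rw [hstart, hassoc]
        rw [pv_copy_loop (P ++ ':' :: T.reverse) (':' :: Q.reverse) (P.length + 1)]
        rw [List.drop_append]
        have h1 : P.length + 1 - P.length = 1 := by omega
        simp [List.drop_eq_nil_of_le, h1]
      rw [htitle]
      -- genres: drop loop on the whole list
      have hend : ((((P ++ ':' :: T.reverse).length : Nat) : Int) + 1)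
          = ((((P ++ ':' :: T.reverse).length + 1 : Nat)) : Int) := by push_cast; ring
      have hgen : (PySem.List.pyRange ((((P ++ ':' :: T.reverse).length : Nat) : Int) + 1) (((P ++ ':' :: (T.reverse ++ ':' :: Q.reverse)).length : Nat) : Int) 1).foldl
          (fun acc g => acc ++ [PySem.List.pyGetD (P ++ ':' :: (T.reverse ++ ':' :: Q.reverse)) g ' ']) []
          = Q.reverse := by
        rw [hend]
        rw [pv_drop_loop (P ++ ':' :: (T.reverse ++ ':' :: Q.reverse)) ((P ++ ':' :: T.reverse).length + 1)]
        rw [List.drop_append]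
        have h1 : (P ++ ':' :: T.reverse).length + 1 - P.length = T.length + 2 := by simp; omega
        have h2 : P.length ≤ (P ++ ':' :: T.reverse).length + 1 := by simp; omega
        rw [List.drop_eq_nil_of_le h2, h1, List.nil_append, List.drop_succ_cons, List.drop_append]
        have h3 : T.length + 1 - T.reverse.length = 1 := by simp
        have h4 : T.reverse.length ≤ T.length + 1 := by simp
        rw [List.drop_eq_nil_of_le h4, h3, List.nil_append, List.drop_succ_cons, List.drop_zero]
      rw [hgen]
      -- B side
      have htail : (':' :: (T.reverse ++ ':' :: Q.reverse)).tail = T.reverse ++ ':' :: Q.reverse := rfl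
      rw [htail]
      have hrev : (T.reverse ++ ':' :: Q.reverse).reverse = Q ++ ':' :: T := by simp
      rw [hrev, pv_takeWhile_append hQ, pv_dropWhile_append hQ]
      simp
    · -- single colon: rfind also points at it
      rw [pv_rfind_eq P R hR]
      rw [if_neg (by intro hc; rcases hc with hc | hc <;> omega)]
      rw [if_pos (by simp)]
      rw [pv_movie_loop P (':' :: R)]
      have htitle : PySem.List.pyRange ((P.length : Int) + 1) (P.length : Int) 1 = [] := by
        apply List.eq_nil_of_length_eq_zero
        rw [PySem.List.length_pyRange_one]
        omega
      rw [htitle]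
      have hend : ((P.length : Int) + 1) = (((P.length + 1 : Nat)) : Int) := by push_cast; ring
      have hgen : (PySem.List.pyRange ((P.length : Int) + 1) (((P ++ ':' :: R).length : Nat) : Int) 1).foldl
          (fun acc g => acc ++ [PySem.List.pyGetD (P ++ ':' :: R) g ' ']) []
          = R := by
        rw [hend, pv_drop_loop (P ++ ':' :: R) (P.length + 1)]
        simp [List.drop_append]
      rw [hgen]
      have htail : (':' :: R).tail = R := rfl
      rw [htail]
      have hnr : ':' ∉ R.reverse := by simpa using hR
      rw [pv_takeWhile_all hnr, pv_dropWhile_all hnr]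
      simp
  · have hfind : PySem.Chars.find l [':'] = -1 := by
      rw [PySem.Chars.find_eq_neg_one_iff]
      intro hinf
      exact hmem (hinf.subset (by simp))
    simp only [hfind]
    rw [if_pos (Or.inl trivial)]
    have hcont : l.contains ':' = false := by
      simpa using hmem
    rw [hcont]
    simp

-- ===== VERDICT (by name: the statement is the Claim_ definition above) =====
theorem tokenize_movie_entry_spec : Claim_equal_tokenize_movie_entry := by
  intro entry _
  unfold Spec_tokenize_movie_entry tokenize_movie_entry tokenize_movie_entry_alt
  exact pv_main entry.toList
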